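-- pv_equiv track=rewrite | github.com/sumitmalik51/tool-plagrism | app/tools/fingerprint_tool.py | _rolling_hashes
-- ===== SOURCE A (Python) =====
-- def _rolling_hashes(text: str, k: int) -> list[int]:
--     """Generate k-gram hashes using a fast polynomial rolling hash.
--
--     Uses Rabin-style rolling hash instead of per-gram MD5 — orders of
--     magnitude faster for long texts.
--     """
--     n = len(text)
--     if n < k:
--         return []
--
--     _BASE = 31
--     _MOD = (1 << 61) - 1  # Mersenne prime for fast modular arithmetic
--
--     # Precompute base^k mod _MOD for sliding the window
--     base_k = pow(_BASE, k, _MOD)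
--
--     # Compute initial hash for text[0:k]
--     h = 0
--     for ch in text[:k]:
--         h = (h * _BASE + ord(ch)) % _MOD
--
--     hashes = [h]
--     for i in range(1, n - k + 1):
--         # Slide: remove text[i-1], add text[i+k-1]
--         h = (h * _BASE - ord(text[i - 1]) * base_k + ord(text[i + k - 1])) % _MOD
--         hashes.append(h)
--
--     return hashes
-- ===== SOURCE B (Python) =====
-- def _rolling_hashes(text: str, k: int) -> list[int]:
--     """Direct per-window Horner hash: recompute each k-gram's polynomial hash
--     from scratch instead of sliding a running hash with a precomputed base^k."""
--     BASE = 31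
--     MOD = (1 << 61) - 1
--     out = []
--     for i in range(len(text) - k + 1):
--         h = 0
--         for ch in text[i:i + k]:
--             h = (h * BASE + ord(ch)) % MOD
--         out.append(h)
--     return out
-- ===== Notes on version B (the rewrite author's own statement) =====
-- stated objective: simpler
-- what changed: Replaces A's single-pass sliding rolling hash (initial-window hash, precomputed base^k, per-step slide update, separate n<k guard) by a plain nested loop that recomputes each window's Horner hash from scratch; the guard disappears because an empty range yields [].
import Mathlib
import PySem

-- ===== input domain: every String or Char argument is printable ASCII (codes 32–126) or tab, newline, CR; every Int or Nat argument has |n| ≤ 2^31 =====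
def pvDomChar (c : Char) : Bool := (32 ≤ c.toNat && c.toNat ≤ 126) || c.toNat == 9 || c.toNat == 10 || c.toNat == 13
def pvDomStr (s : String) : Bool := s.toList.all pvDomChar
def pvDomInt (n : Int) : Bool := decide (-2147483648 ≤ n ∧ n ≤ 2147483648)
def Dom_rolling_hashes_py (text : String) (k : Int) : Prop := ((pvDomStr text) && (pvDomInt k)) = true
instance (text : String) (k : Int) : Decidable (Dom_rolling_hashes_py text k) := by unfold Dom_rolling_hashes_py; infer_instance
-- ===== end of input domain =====

-- B replaces A's sliding rolling-hash update by a direct per-window Horner recomputation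
-- (simpler: no precomputed base^k, no running hash; O(n*k) instead of O(n)).

-- ===== PORT A =====
-- Literal port of A. pow(31, k, MOD) is PySem.Int.powMod with exponent k.toNat — exact for
-- 0 ≤ k (Pre_ ensures this; for every k < 0 the Python raises IndexError in the slide loop).
-- The pyGetD default ' ' is never read: inside Pre_ both loop indices are in range.
def rolling_hashes_py (text : String) (k : Int) : List Int :=
  let cs := text.toList
  let n : Int := cs.length
  if n < k then []
  else
    let base_k : Int := PySem.Int.powMod 31 k.toNat 2305843009213693951
    let h0 : Int := (PySem.List.slice cs none (some k)).foldl
      (fun h ch => PySem.Int.mod (h * 31 + (ch.toNat : Int)) 2305843009213693951) 0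
    let st := (PySem.List.pyRange 1 (n - k + 1)).foldl
      (fun (st : Int × List Int) (i : Int) =>
        let h := PySem.Int.mod
          (st.1 * 31 - ((PySem.List.pyGetD cs (i - 1) ' ').toNat : Int) * base_k
            + ((PySem.List.pyGetD cs (i + k - 1) ' ').toNat : Int)) 2305843009213693951
        (h, st.2 ++ [h]))
      (h0, [h0])
    st.2

-- ===== PORT B =====
-- Literal port of B (Source B): for each window start i, recompute Horner from 0 over text[i:i+k].
def rolling_hashes_py_alt (text : String) (k : Int) : List Int :=
  let cs := text.toList
  let n : Int := cs.length
  (PySem.List.pyRange 0 (n - k + 1)).foldl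
    (fun out i =>
      out ++ [(PySem.List.slice cs (some i) (some (i + k))).foldl
        (fun h ch => PySem.Int.mod (h * 31 + (ch.toNat : Int)) 2305843009213693951) 0])
    []

-- ===== PRECONDITION & SPEC =====
-- Pre_ excludes exactly k < 0: there the Python A raises IndexError (its slide loop reads
-- text[i + k - 1] for i up to n - k > n, past the end of the string).
def Pre_rolling_hashes_py (text : String) (k : Int) : Prop := 0 ≤ k
instance (text : String) (k : Int) : Decidable (Pre_rolling_hashes_py text k) := by unfold Pre_rolling_hashes_py; infer_instance
def pvWitness_rolling_hashes_py : String × Int := ("hello world", 3)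

def Spec_rolling_hashes_py (text : String) (k : Int) (out : List Int) : Prop := out = rolling_hashes_py_alt text k
instance (text : String) (k : Int) (out : List Int) : Decidable (Spec_rolling_hashes_py text k out) := by unfold Spec_rolling_hashes_py; infer_instance

-- ===== CLAIM (what is proved, stated in full; the proofs are below) =====
def Claim_equal_rolling_hashes_py : Prop := ∀ (text : String) (k : Int), Dom_rolling_hashes_py text k → Pre_rolling_hashes_py text k → Spec_rolling_hashes_py text k (rolling_hashes_py text k)

-- ===== LEMMAS AND PROOFS =====

-- the Mersenne modulus, and the pure (mod-free) Horner polynomial of a window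
def pvM : Int := 2305843009213693951

def pvHf (h : Int) (l : List Char) : Int := l.foldl (fun h c => h * 31 + (c.toNat : Int)) h

lemma pvM_pos : (0 : Int) < pvM := by norm_num [pvM]

lemma pvHf_shift (l : List Char) : ∀ h : Int, pvHf h l = h * 31 ^ l.length + pvHf 0 l := by
  induction l with
  | nil => intro h; simp [pvHf]
  | cons c t ih =>
      intro h
      simp only [pvHf, List.foldl_cons] at *
      rw [ih (h * 31 + c.toNat), ih ((0 : Int) * 31 + c.toNat)]
      simp [List.length_cons, pow_succ]
      ring

lemma pvHf_append (h : Int) (l : List Char) (c : Char) :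
    pvHf h (l ++ [c]) = pvHf h l * 31 + c.toNat := by
  simp [pvHf, List.foldl_append]

-- per-step reduction commutes with mod
lemma pv_foldlMod (l : List Char) : ∀ h : Int,
    l.foldl (fun h c => (h * 31 + (c.toNat : Int)) % pvM) (h % pvM) = pvHf h l % pvM := by
  induction l with
  | nil => intro h; simp [pvHf]
  | cons c t ih =>
      intro h
      simp only [List.foldl_cons, pvHf]
      have : (h % pvM * 31 + (c.toNat : Int)) % pvM = (h * 31 + (c.toNat : Int)) % pvM := by
        conv_lhs => rw [Int.add_emod, Int.mul_emod, Int.emod_emod_of_dvd _ dvd_rfl]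
        conv_rhs => rw [Int.add_emod, Int.mul_emod]
      rw [this]
      simpa [pvHf] using ih (h * 31 + (c.toNat : Int))

-- pushing % pvM through the slide arithmetic
lemma pv_mod_step (a b c d e : Int) :
    ((a % pvM) * b - c * (d % pvM) + e) % pvM = (a * b - c * d + e) % pvM := by
  have ha : a % pvM ≡ a [ZMOD pvM] := Int.emod_emod_of_dvd a dvd_rfl
  have hd : d % pvM ≡ d [ZMOD pvM] := Int.emod_emod_of_dvd d dvd_rfl
  exact ((ha.mul_right b).sub (hd.mul_left c)).add_right e

-- the exact slide identity over ℤ: window at position 1 from window at position 0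
lemma pv_slide (l : List Char) (K : Nat) (hK : K < l.length) :
    pvHf 0 (l.take K) * 31 - ((l.getD 0 ' ').toNat : Int) * 31 ^ K + ((l.getD K ' ').toNat : Int)
      = pvHf 0 ((l.drop 1).take K) := by
  cases l with
  | nil => simp at hK
  | cons a t =>
      cases K with
      | zero => simp [pvHf]
      | succ K' =>
          have hK' : K' < t.length := by simpa using hK
          have htake : t.take (K' + 1) = t.take K' ++ [t[K']] := by
            rw [List.take_add_one]
            simp [List.getElem?_eq_getElem hK']
          simp only [List.take_succ_cons, List.drop_succ_cons, List.drop_zero]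
          rw [htake, pvHf_append]
          have : pvHf 0 (a :: t.take K') = pvHf ((a.toNat : Int)) (t.take K') := by
            simp [pvHf]
          rw [this, pvHf_shift (t.take K') ((a.toNat : Int))]
          have hlen : (t.take K').length = K' := by simp [hK'.le]
          rw [hlen]
          simp [List.getD, List.getElem?_eq_getElem hK', pow_succ]
          ring

-- A's slide-loop step function (the zeta-reduced body of the fold in port A)
def pvStepA (cs : List Char) (k : Int) (st : Int × List Int) (i : Int) : Int × List Int :=
  (PySem.Int.mod
      (st.1 * 31 - ((PySem.List.pyGetD cs (i - 1) ' ').toNat : Int) * PySem.Int.powMod 31 k.toNat 2305843009213693951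
        + ((PySem.List.pyGetD cs (i + k - 1) ' ').toNat : Int)) 2305843009213693951,
   st.2 ++ [PySem.Int.mod
      (st.1 * 31 - ((PySem.List.pyGetD cs (i - 1) ' ').toNat : Int) * PySem.Int.powMod 31 k.toNat 2305843009213693951
        + ((PySem.List.pyGetD cs (i + k - 1) ' ').toNat : Int)) 2305843009213693951])

-- one slide step sends the hash of window j-1 to the hash of window j
lemma pv_stepA_eq (cs : List Char) (k j : Int) (hk : 0 ≤ k) (hj : 1 ≤ j)
    (hjb : j ≤ (cs.length : Int) - k) (L : List Int) :
    pvStepA cs k (pvHf 0 ((cs.drop (j - 1).toNat).take k.toNat) % pvM, L) j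
      = (pvHf 0 ((cs.drop j.toNat).take k.toNat) % pvM,
         L ++ [pvHf 0 ((cs.drop j.toNat).take k.toNat) % pvM]) := by
  have hKlen : k.toNat < (cs.drop (j - 1).toNat).length := by
    rw [List.length_drop]; omega
  have e1 : PySem.List.pyGetD cs (j - 1) ' ' = (cs.drop (j - 1).toNat).getD 0 ' ' := by
    rw [PySem.List.pyGetD_of_nonneg cs ' ' (show (0 : Int) ≤ j - 1 by omega)]
    simp [List.getD, List.getElem?_drop]
  have e2 : PySem.List.pyGetD cs (j + k - 1) ' ' = (cs.drop (j - 1).toNat).getD k.toNat ' ' := by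
    rw [PySem.List.pyGetD_of_nonneg cs ' ' (show (0 : Int) ≤ j + k - 1 by omega)]
    rw [show (j + k - 1).toNat = (j - 1).toNat + k.toNat by omega]
    simp [List.getD, List.getElem?_drop]
  have e3 : (cs.drop (j - 1).toNat).drop 1 = cs.drop j.toNat := by
    rw [List.drop_drop]
    congr 1
    omega
  have hM : (2305843009213693951 : Int) = pvM := rfl
  simp only [pvStepA, PySem.Int.powMod, e1, e2]
  rw [hM]
  simp only [PySem.Int.mod_eq_emod_of_pos pvM_pos]
  rw [pv_mod_step, pv_slide _ _ hKlen, e3]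

-- the slide loop maps every window index to its window hash
lemma pv_loopA (cs : List Char) (k : Int) (hk : 0 ≤ k) (_hkn : k ≤ (cs.length : Int)) :
    ∀ (cnt : Nat) (j : Int) (L : List Int), 1 ≤ j → (cs.length : Int) - k + 1 = j + cnt →
    ((PySem.List.pyRange j ((cs.length : Int) - k + 1)).foldl (pvStepA cs k)
        (pvHf 0 ((cs.drop (j - 1).toNat).take k.toNat) % pvM, L)).2
      = L ++ (PySem.List.pyRange j ((cs.length : Int) - k + 1)).map
          (fun i => pvHf 0 ((cs.drop i.toNat).take k.toNat) % pvM) := by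
  intro cnt
  induction cnt with
  | zero =>
      intro j L _ hcnt
      rw [PySem.List.pyRange_one_eq_nil (by omega)]
      simp
  | succ m ih =>
      intro j L hj hcnt
      rw [PySem.List.pyRange_one_cons (by omega)]
      simp only [List.foldl_cons, List.map_cons]
      rw [pv_stepA_eq cs k j hk hj (by omega)]
      have hrec := ih (j + 1) (L ++ [pvHf 0 ((cs.drop j.toNat).take k.toNat) % pvM]) (by omega) (by omega)
      have hidx : (j + 1 - 1).toNat = j.toNat := by omega
      rw [hidx] at hrec
      rw [hrec, List.append_assoc]
      rfl

-- B's port is the list of per-window Horner hashes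
lemma pv_alt_eq (text : String) (k : Int) (hk : 0 ≤ k) :
    rolling_hashes_py_alt text k
      = (PySem.List.pyRange 0 ((text.toList.length : Int) - k + 1)).map
          (fun i => pvHf 0 ((text.toList.drop i.toNat).take k.toNat) % pvM) := by
  simp only [rolling_hashes_py_alt]
  rw [PySem.List.foldl_append_singleton_eq_map]
  rw [List.nil_append]
  apply List.map_congr_left
  intro i hi
  have hi0 : 0 ≤ i := ((PySem.List.mem_pyRange_one).1 hi).1
  have hM : (2305843009213693951 : Int) = pvM := rfl
  rw [PySem.List.slice_toNat _ hi0 (by omega)]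
  have hKK : (i + k).toNat - i.toNat = k.toNat := by omega
  rw [hKK]
  rw [hM]
  simp only [PySem.Int.mod_eq_emod_of_pos pvM_pos]
  conv_lhs => rw [show (0 : Int) = 0 % pvM by norm_num]
  exact pv_foldlMod _ 0

theorem rolling_hashes_py_spec : Claim_equal_rolling_hashes_py := by
  intro text k _ hk
  unfold Spec_rolling_hashes_py
  have hM : (2305843009213693951 : Int) = pvM := rfl
  by_cases hlt : (text.toList.length : Int) < k
  · -- n < k: both sides are []
    simp only [rolling_hashes_py, rolling_hashes_py_alt, if_pos hlt]
    rw [PySem.List.pyRange_one_eq_nil (by omega)]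
    rfl
  · rw [pv_alt_eq text k hk]
    simp only [rolling_hashes_py, if_neg hlt]
    -- initial hash is the hash of window 0
    have hh0 : (PySem.List.slice text.toList none (some k)).foldl
        (fun h ch => PySem.Int.mod (h * 31 + (ch.toNat : Int)) 2305843009213693951) 0
        = pvHf 0 ((text.toList.drop ((1 : Int) - 1).toNat).take k.toNat) % pvM := by
      rw [PySem.List.slice_to _ hk, hM]
      simp only [PySem.Int.mod_eq_emod_of_pos pvM_pos]
      conv_lhs => rw [show (0 : Int) = 0 % pvM by norm_num]
      rw [pv_foldlMod]
      norm_num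
    rw [hh0]
    show (List.foldl (pvStepA text.toList k) _ _).2 = _
    rw [pv_loopA text.toList k hk (by omega) ((text.toList.length : Int) - k).toNat 1 _
        (le_refl 1) (by omega)]
    rw [PySem.List.pyRange_one_cons (show (0 : Int) < (text.toList.length : Int) - k + 1 by omega)]
    rw [List.map_cons]
    rw [show ((1 : Int) - 1).toNat = (0 : Int).toNat by norm_num]
    rfl
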